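-- pv_equiv track=rewrite | github.com/prestigeworldwidecr/CodeSignal | isBeautifulString/is_beautiful_string.py | beautiful_count
-- ===== SOURCE A (Python) =====
-- from collections import Counter
--
-- def beautiful_count(inputString) :
-- # {
--     tmp = dict(Counter(list(sorted(inputString))))
--     tmp = list(tmp.values())
--     result = False
--
--     for i in range(len(tmp) - 1) :
--     # {
--         if (tmp[i] < tmp[i + 1]) :
--         # {
--             return False
--         # }
--
--         else :
--         # {
--             result = True
--         # }
--
--     # }
--
--     return result
-- ===== SOURCE B (Python) =====
-- def beautiful_count(inputString):
--     # One fused pass over the sorted characters: track the current run and the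
--     # previous run's length instead of building a Counter and a values list.
--     cur = None
--     cnt = 0
--     prev = None
--     result = False
--     for ch in sorted(inputString):
--         if ch == cur:
--             cnt += 1
--         else:
--             if cur is not None:
--                 if prev is not None:
--                     if prev < cnt:
--                         return False
--                     result = True
--                 prev = cnt
--             cur = ch
--             cnt = 1
--     if cur is not None:
--         if prev is not None:
--             if prev < cnt:
--                 return False
--             result = True
--     return result
-- ===== Notes on version B (the rewrite author's own statement) =====
-- stated objective: alternative
-- what changed: Replaces Counter(sorted(s)) -> values list -> indexed adjacent-pair loop with a single fused scan over sorted(s) that tracks the current run's character and count plus the previous run's length, so no dict or values list is ever built.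
import Mathlib
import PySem

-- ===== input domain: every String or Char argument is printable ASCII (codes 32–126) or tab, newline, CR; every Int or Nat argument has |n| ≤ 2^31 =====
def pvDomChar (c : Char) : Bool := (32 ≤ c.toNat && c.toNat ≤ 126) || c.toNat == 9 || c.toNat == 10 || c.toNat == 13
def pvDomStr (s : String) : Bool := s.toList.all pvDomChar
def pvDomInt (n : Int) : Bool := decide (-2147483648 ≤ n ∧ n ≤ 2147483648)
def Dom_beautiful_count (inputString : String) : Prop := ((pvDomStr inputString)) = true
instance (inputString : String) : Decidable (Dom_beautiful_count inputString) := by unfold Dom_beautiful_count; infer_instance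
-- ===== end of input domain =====

-- B replaces A's Counter-then-values-then-index-loop with one fused scan over the
-- sorted characters (run-length tracking); objective: alternative decomposition.

-- ===== PORT A =====
-- the 'for i in range(len(tmp)-1): if tmp[i] < tmp[i+1]: return False else: result = True'
-- loop, as structural recursion over adjacent pairs of the values list
def pvALoop : List Int → Bool → Bool
  | v0 :: v1 :: rest, _ => if v0 < v1 then false else pvALoop (v1 :: rest) true
  | _, result => result

def beautiful_count (inputString : String) : Bool :=
  let tmp := PySem.Dict.counter (PySem.List.sorted inputString.toList (fun c => c))
  let vals := tmp.values
  pvALoop vals false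

-- ===== PORT B =====
-- Source B's loop state: cur (current char), cnt (its running count), prev (length of
-- the previously completed run), result; the [] case is Source B's code after the loop
def pvBLoop : List Char → Option Char → Int → Option Int → Bool → Bool
  | [], cur, cnt, prev, result =>
      match cur with
      | none => result
      | some _ =>
        match prev with
        | none => result
        | some p => if p < cnt then false else true
  | ch :: rest, cur, cnt, prev, result =>
      if some ch == cur then pvBLoop rest cur (cnt + 1) prev result
      else
        match cur with
        | none => pvBLoop rest (some ch) 1 prev result
        | some _ =>
          match prev with
          | none => pvBLoop rest (some ch) 1 (some cnt) result
          | some p => if p < cnt then false else pvBLoop rest (some ch) 1 (some cnt) true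

def beautiful_count_alt (inputString : String) : Bool :=
  pvBLoop (PySem.List.sorted inputString.toList (fun c => c)) none 0 none false

-- ===== PRECONDITION & SPEC =====
def Spec_beautiful_count (inputString : String) (out : Bool) : Prop := out = beautiful_count_alt inputString
instance (inputString : String) (out : Bool) : Decidable (Spec_beautiful_count inputString out) := by unfold Spec_beautiful_count; infer_instance

-- ===== CLAIM (what is proved, stated in full; the proofs are below) =====
def Claim_equal_beautiful_count : Prop := ∀ (inputString : String), Dom_beautiful_count inputString → Spec_beautiful_count inputString (beautiful_count inputString)

-- ===== LEMMAS AND PROOFS =====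

-- run lengths of a list of characters (abstraction both ports are reduced to)
def pvRunsAux (c : Char) (n : Int) : List Char → List Int
  | [] => [n]
  | x :: t => if x == c then pvRunsAux c (n + 1) t else n :: pvRunsAux x 1 t

def pvRuns : List Char → List Int
  | [] => []
  | c :: t => pvRunsAux c 1 t

-- the common "non-increasing and at least two runs" check
def pvChk : List Int → Option Int → Bool → Bool
  | [], _, res => res
  | v :: rest, none, res => pvChk rest (some v) res
  | v :: rest, some p, _res => if p < v then false else pvChk rest (some v) true

theorem pvALoop_cons (rest : List Int) : ∀ (v : Int) (res : Bool),
    pvALoop (v :: rest) res = pvChk rest (some v) res := by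
  induction rest with
  | nil => intro v res; rfl
  | cons w r ih =>
      intro v res
      simp only [pvALoop, pvChk]
      by_cases h : v < w <;> simp [h, ih]

theorem pvALoop_eq_chk (vals : List Int) (res : Bool) :
    pvALoop vals res = pvChk vals none res := by
  cases vals with
  | nil => rfl
  | cons v rest => rw [pvALoop_cons]; rfl

theorem pvBLoop_eq_chk (t : List Char) : ∀ (c : Char) (n : Int) (prev : Option Int) (res : Bool),
    pvBLoop t (some c) n prev res = pvChk (pvRunsAux c n t) prev res := by
  induction t with
  | nil =>
      intro c n prev res
      cases prev <;> rfl
  | cons x t ih =>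
      intro c n prev res
      by_cases h : x = c
      · subst h
        simp only [pvBLoop, pvRunsAux]
        simp [ih]
      · have hbe : (x == c) = false := by simp [h]
        simp only [pvBLoop, pvRunsAux, hbe]
        have : (some x == some c) = false := by simp [h]
        simp only [this, Bool.false_eq_true, if_false]
        cases prev with
        | none => simp [pvChk, ih]
        | some p =>
            simp only [pvChk]
            by_cases hp : p < n <;> simp [hp, ih]

theorem pvBLoop_start (l : List Char) :
    pvBLoop l none 0 none false = pvChk (pvRuns l) none false := by
  cases l with
  | nil => rfl
  | cons c t =>
      have : (some c == (none : Option Char)) = false := rfl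
      simp only [pvBLoop, this, Bool.false_eq_true, if_false, pvRuns]
      exact pvBLoop_eq_chk t c 1 none false

-- ---- Set.ofList of a sorted list has run-head structure ----

theorem pvFoldlAdd_dup (tw : List Char) : ∀ (s : PySem.Set Char) (c : Char),
    (∀ x ∈ tw, x = c) → c ∈ s → tw.foldl PySem.Set.add s = s := by
  induction tw with
  | nil => intro s c _ _; rfl
  | cons x t ih =>
      intro s c hall hc
      have hx : x = c := hall x (by simp)
      have : PySem.Set.add s x = s := by
        simp [PySem.Set.add, PySem.Set.contains, hx, hc]
      simp only [List.foldl_cons, this]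
      exact ih s c (fun y hy => hall y (by simp [hy])) hc

theorem pvFoldlAdd_cons (td : List Char) : ∀ (s : List Char) (c : Char),
    c ∉ td → td.foldl PySem.Set.add (c :: s) = c :: td.foldl PySem.Set.add s := by
  induction td with
  | nil => intro s c _; rfl
  | cons x t ih =>
      intro s c hnm
      have hxc : x ≠ c := by intro h; exact hnm (by simp [h])
      have hadd : PySem.Set.add (c :: s) x = c :: PySem.Set.add s x := by
        simp only [PySem.Set.add, PySem.Set.contains]
        by_cases h : x ∈ s
        · simp [h, hxc]
        · simp [h, hxc]
      simp only [List.foldl_cons, hadd]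
      exact ih _ c (fun h => hnm (by simp [h]))

theorem pvOfList_cons_sorted (c : Char) (t : List Char)
    (hs : (c :: t).Pairwise (· ≤ ·)) :
    PySem.Set.ofList (c :: t) = c :: PySem.Set.ofList (t.dropWhile (· == c)) := by
  have hdecomp : t = t.takeWhile (· == c) ++ t.dropWhile (· == c) :=
    (List.takeWhile_append_dropWhile).symm
  have htw : ∀ x ∈ t.takeWhile (· == c), x = c := by
    intro x hx
    have := List.mem_takeWhile_imp hx
    simpa using this
  have hcnd : c ∉ t.dropWhile (· == c) := by
    intro hc
    cases hd : t.dropWhile (· == c) with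
    | nil => simp [hd] at hc
    | cons d r =>
        have hdne : ¬ (d == c) = true := by
          have := List.head?_dropWhile_not (p := (· == c)) (l := t)
          simp [hd] at this
          simpa using this
        have hdc : d ≠ c := by simpa using hdne
        rw [hd] at hc
        rcases List.mem_cons.mp hc with h | h
        · exact hdc h.symm
        · -- c strictly after d in the sorted tail: d ≤ c and c ≤ d forces d = c
          have hpt : t.Pairwise (· ≤ ·) := (List.pairwise_cons.mp hs).2
          have hsub : (d :: r).Sublist t := by
            rw [hdecomp, hd]; exact (List.sublist_append_right _ _)
          have hdr : (d :: r).Pairwise (· ≤ ·) := hpt.sublist hsub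
          have hdle : d ≤ c := (List.pairwise_cons.mp hdr).1 c h
          have hcle : c ≤ d := by
            have hct : d ∈ t := by
              rw [hdecomp, hd]; exact List.mem_append_right _ (by simp)
            exact (List.pairwise_cons.mp hs).1 d hct
          exact hdc (le_antisymm hdle hcle)
  show (c :: t).foldl PySem.Set.add PySem.Set.empty = _
  rw [List.foldl_cons]
  have h1 : PySem.Set.add PySem.Set.empty c = [c] := rfl
  rw [h1]
  conv_lhs => rw [hdecomp]
  rw [List.foldl_append]
  rw [pvFoldlAdd_dup (t.takeWhile (· == c)) [c] c htw (by simp)]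
  exact pvFoldlAdd_cons _ [] c hcnd

-- ---- counts in a sorted list ----

theorem pvSorted_tail_facts (c : Char) (t : List Char)
    (hs : (c :: t).Pairwise (· ≤ ·)) :
    ((c :: t).count c = 1 + (t.takeWhile (· == c)).length)
    ∧ (∀ k ∈ t.dropWhile (· == c), (c :: t).count k = (t.dropWhile (· == c)).count k) := by
  have hdecomp : t = t.takeWhile (· == c) ++ t.dropWhile (· == c) :=
    (List.takeWhile_append_dropWhile).symm
  have htw : ∀ x ∈ t.takeWhile (· == c), x = c := by
    intro x hx; simpa using List.mem_takeWhile_imp hx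
  have hcnd : c ∉ t.dropWhile (· == c) := by
    -- same argument as in pvOfList_cons_sorted, reused via that lemma's statement is
    -- not possible; reprove quickly
    intro hc
    cases hd : t.dropWhile (· == c) with
    | nil => simp [hd] at hc
    | cons d r =>
        have hdne : ¬ (d == c) = true := by
          have := List.head?_dropWhile_not (p := (· == c)) (l := t)
          simp [hd] at this
          simpa using this
        have hdc : d ≠ c := by simpa using hdne
        rw [hd] at hc
        rcases List.mem_cons.mp hc with h | h
        · exact hdc h.symm
        · have hpt : t.Pairwise (· ≤ ·) := (List.pairwise_cons.mp hs).2
          have hsub : (d :: r).Sublist t := by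
            rw [hdecomp, hd]; exact (List.sublist_append_right _ _)
          have hdr : (d :: r).Pairwise (· ≤ ·) := hpt.sublist hsub
          have hdle : d ≤ c := (List.pairwise_cons.mp hdr).1 c h
          have hcle : c ≤ d := by
            have hct : d ∈ t := by
              rw [hdecomp, hd]; exact List.mem_append_right _ (by simp)
            exact (List.pairwise_cons.mp hs).1 d hct
          exact hdc (le_antisymm hdle hcle)
  constructor
  · have htwc : (t.takeWhile (· == c)).count c = (t.takeWhile (· == c)).length := by
      apply List.count_eq_length.mpr
      intro x hx; exact (htw x hx).symm
    have hdc : (t.dropWhile (· == c)).count c = 0 := List.count_eq_zero.mpr hcnd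
    rw [List.count_cons_self]
    conv_lhs => rw [hdecomp]
    rw [List.count_append, htwc, hdc]
    omega
  · intro k hk
    have hkc : k ≠ c := fun h => hcnd (h ▸ hk)
    have h1 : (t.takeWhile (· == c)).count k = 0 := by
      apply List.count_eq_zero.mpr
      intro hkm; exact hkc (htw k hkm)
    have h2 : (c :: t).count k = t.count k := by
      simp [Ne.symm hkc]
    rw [h2]
    conv_lhs => rw [hdecomp]
    rw [List.count_append, h1]
    omega

theorem pvRunsAux_decomp (tw : List Char) : ∀ (c : Char) (n : Int),
    (∀ x ∈ tw, x = c) →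
    ∀ td : List Char, (∀ d r, td = d :: r → d ≠ c) →
    pvRunsAux c n (tw ++ td) = (n + tw.length) :: pvRuns td := by
  induction tw with
  | nil =>
      intro c n _ td hhd
      cases td with
      | nil => simp [pvRunsAux, pvRuns]
      | cons d r =>
          have : d ≠ c := hhd d r rfl
          simp [pvRunsAux, pvRuns, this]
  | cons x t ih =>
      intro c n hall td hhd
      have hx : x = c := hall x (by simp)
      subst hx
      simp only [List.cons_append, pvRunsAux, beq_self_eq_true, if_true]
      rw [ih x (n + 1) (fun y hy => hall y (by simp [hy])) td hhd]
      simp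
      ring_nf

theorem pvMain : ∀ (N : Nat) (l : List Char), l.length ≤ N → l.Pairwise (· ≤ ·) →
    (PySem.Set.ofList l).map (fun k => ((l.count k : Nat) : Int)) = pvRuns l := by
  intro N
  induction N with
  | zero =>
      intro l hl _
      have : l = [] := List.length_eq_zero_iff.mp (Nat.le_zero.mp hl)
      subst this; rfl
  | succ N ih =>
      intro l hl hs
      cases l with
      | nil => rfl
      | cons c t =>
          have hdecomp : t = t.takeWhile (· == c) ++ t.dropWhile (· == c) :=
            (List.takeWhile_append_dropWhile).symm
          set td := t.dropWhile (· == c) with htd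
          have hfacts := pvSorted_tail_facts c t hs
          have htdsorted : td.Pairwise (· ≤ ·) := by
            have hpt : t.Pairwise (· ≤ ·) := (List.pairwise_cons.mp hs).2
            exact hpt.sublist (List.dropWhile_sublist _)
          have htdlen : td.length ≤ N := by
            have : td.length ≤ t.length := (List.dropWhile_sublist _).length_le
            simp only [List.length_cons] at hl
            omega
          rw [pvOfList_cons_sorted c t hs]
          rw [List.map_cons]
          have hcount : (((c :: t).count c : Nat) : Int) = 1 + (t.takeWhile (· == c)).length := by
            rw [hfacts.1]; push_cast; ring
          rw [hcount]
          have htail : (PySem.Set.ofList td).map (fun k => (((c :: t).count k : Nat) : Int))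
              = (PySem.Set.ofList td).map (fun k => ((td.count k : Nat) : Int)) := by
            apply List.map_congr_left
            intro k hk
            have hkmem : k ∈ td := by
              have : k ∈ PySem.Set.ofList td := hk
              exact (PySem.Set.mem_ofList td k).mp this
            rw [hfacts.2 k hkmem]
          rw [htail, ih td htdlen htdsorted]
          show _ = pvRuns (c :: t)
          have hrc : pvRuns (c :: t) = pvRunsAux c 1 t := rfl
          rw [hrc]
          conv_rhs => rw [hdecomp]
          rw [pvRunsAux_decomp (t.takeWhile (· == c)) c 1 (by
              intro x hx; simpa using List.mem_takeWhile_imp hx) td (by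
              intro d r hdr
              have hdne : ¬ (d == c) = true := by
                have := List.head?_dropWhile_not (p := (· == c)) (l := t)
                rw [← htd, hdr] at this
                simp at this
                simpa using this
              simpa using hdne)]

-- ===== VERDICT (by name: the statement is the Claim_ definition above) =====
theorem beautiful_count_spec : Claim_equal_beautiful_count := by
  intro s _
  unfold Spec_beautiful_count beautiful_count beautiful_count_alt
  set l := PySem.List.sorted s.toList (fun c => c) with hl
  have hsorted : l.Pairwise (· ≤ ·) := by
    have := PySem.List.sorted_pairwise s.toList (fun c => c)
    simpa [hl] using this
  have hvals : (PySem.Dict.counter l).values = pvRuns l := by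
    show ((PySem.Dict.counter l).items).map (·.2) = pvRuns l
    rw [PySem.Dict.items_counter l]
    rw [List.map_map]
    have : ((fun x : Char × Int => x.2) ∘ fun k => (k, ((l.count k : Nat) : Int)))
        = fun k => ((l.count k : Nat) : Int) := rfl
    rw [this]
    exact pvMain l.length l (le_refl _) hsorted
  simp only [hvals]
  rw [pvALoop_eq_chk, pvBLoop_start]
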